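-- pv_equiv track=rewrite | github.com/Nilsolk/labsRPP | lab_1/lab1.py | method_with_std
-- ===== SOURCE A (Python) =====
-- def method_with_std(A, B):
--     result = []
--     i = 0
--
--     while i < len(A):
--         if A[i] % 2 == 0:
--             result.append(A[i])
--             i += 1
--         else:
--             start = i
--             while i < len(A) and A[i] % 2 != 0:
--                 i += 1
--
--             part = A[start:i]
--             keep = False
--             for x in part:
--                 if x in B:
--                     keep = True
--                     break
--
--             if keep:
--                 result += part
--
--     return result
-- ===== SOURCE B (Python) =====
-- def method_with_std(A, B):
--     # forward scan: for each odd element, whether its run-prefix (up to here) hits B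
--     fwd = []
--     prev = False
--     for x in A:
--         if x % 2 != 0:
--             prev = (x in B) or prev
--             fwd.append(prev)
--         else:
--             prev = False
--             fwd.append(False)
--     # backward scan: propagate the hit flag to the whole odd run; evens always kept
--     keep = []
--     nxt = False
--     for x, h in zip(reversed(A), reversed(fwd)):
--         if x % 2 != 0:
--             nxt = h or nxt
--             keep.append(nxt)
--         else:
--             nxt = False
--             keep.append(True)
--     keep.reverse()
--     return [x for x, k in zip(A, keep) if k]
-- ===== Notes on version B (the rewrite author's own statement) =====
-- stated objective: alternative
-- what changed: Replaced the index-driven while loop with an inner run scan and slicing by a mask-based algorithm: a forward flag pass, a backward flag pass over the reversed lists to propagate 'run hits B' to every element of its odd run, then a single zip-filter; no runs are ever materialized.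
import Mathlib
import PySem

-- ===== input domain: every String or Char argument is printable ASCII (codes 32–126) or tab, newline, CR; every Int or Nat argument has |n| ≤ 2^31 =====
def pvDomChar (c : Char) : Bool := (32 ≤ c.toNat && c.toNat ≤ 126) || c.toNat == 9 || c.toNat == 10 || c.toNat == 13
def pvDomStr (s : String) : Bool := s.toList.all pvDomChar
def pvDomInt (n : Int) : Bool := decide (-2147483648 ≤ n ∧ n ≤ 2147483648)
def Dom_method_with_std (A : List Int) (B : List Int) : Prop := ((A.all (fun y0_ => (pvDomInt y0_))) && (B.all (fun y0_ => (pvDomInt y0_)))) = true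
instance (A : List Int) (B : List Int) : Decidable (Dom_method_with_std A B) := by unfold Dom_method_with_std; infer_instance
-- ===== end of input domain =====

-- B replaces A's index-driven while loop (inner run scan + slicing) by a mask algorithm:
-- a forward flag pass, a backward flag pass over the reversed lists, then one zip-filter.
-- Same asymptotic cost; genuinely different traversal (no run is ever materialized).

-- ===== PORT A =====
-- inner `while i < len(A) and A[i] % 2 != 0: i += 1`; fuel = remaining length bounds the loop
def pvInnerWhile (A : List Int) : Nat → Nat → Nat
  | 0, i => i
  | fuel + 1, i =>
    if h : i < A.length then
      if PySem.Int.mod A[i] 2 ≠ 0 then pvInnerWhile A fuel (i + 1) else i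
    else i

-- outer while loop of A, carrying (i, result); fuel = remaining length bounds the loop
def pvALoop (A B : List Int) : Nat → Nat → List Int → List Int
  | 0, _, result => result
  | fuel + 1, i, result =>
    if h : i < A.length then
      if PySem.Int.mod A[i] 2 = 0 then
        pvALoop A B fuel (i + 1) (result ++ [A[i]])
      else
        let j := pvInnerWhile A (A.length - i) i
        let part := PySem.List.slice A (some (i : Int)) (some (j : Int))
        let keep := part.any (fun x => B.contains x)
        pvALoop A B fuel j (if keep then result ++ part else result)
    else result

def method_with_std (A : List Int) (B : List Int) : List Int := pvALoop A B A.length 0 []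

-- ===== PORT B =====
-- forward pass: for each element, carried flag prev; odd: prev := (x in B) or prev, append prev; even: reset, append False
def pvFwd (B : List Int) : List Int → Bool → List Bool
  | [], _ => []
  | x :: xs, prev =>
    if PySem.Int.mod x 2 ≠ 0 then
      (B.contains x || prev) :: pvFwd B xs (B.contains x || prev)
    else
      false :: pvFwd B xs false

-- backward pass over zip(reversed(A), reversed(fwd)) with carried flag nxt
def pvBwd : List (Int × Bool) → Bool → List Bool
  | [], _ => []
  | (x, h) :: rest, nxt =>
    if PySem.Int.mod x 2 ≠ 0 then
      (h || nxt) :: pvBwd rest (h || nxt)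
    else
      true :: pvBwd rest false

def method_with_std_alt (A : List Int) (B : List Int) : List Int :=
  let fwd := pvFwd B A false
  let keep := (pvBwd (A.reverse.zip fwd.reverse) false).reverse
  ((A.zip keep).filter (fun p => p.2)).map (fun p => p.1)

-- ===== PRECONDITION & SPEC =====
def Spec_method_with_std (A : List Int) (B : List Int) (out : List Int) : Prop := out = method_with_std_alt A B
instance (A : List Int) (B : List Int) (out : List Int) : Decidable (Spec_method_with_std A B out) := by unfold Spec_method_with_std; infer_instance

-- ===== CLAIM (what is proved, stated in full; the proofs are below) =====
def Claim_equal_method_with_std : Prop := ∀ (A : List Int) (B : List Int), Dom_method_with_std A B → Spec_method_with_std A B (method_with_std A B)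

-- ===== LEMMAS AND PROOFS =====

def pvOdd (x : Int) : Bool := !(PySem.Int.mod x 2 == 0)

lemma pvOdd_iff (x : Int) : pvOdd x = true ↔ PySem.Int.mod x 2 ≠ 0 := by
  simp [pvOdd]

-- carried state of the forward pass after a list
def pvFwdSt (B : List Int) : List Int → Bool → Bool
  | [], prev => prev
  | x :: xs, prev =>
    if PySem.Int.mod x 2 ≠ 0 then pvFwdSt B xs (B.contains x || prev)
    else pvFwdSt B xs false

-- carried state of the backward pass after a pair list
def pvBwdSt : List (Int × Bool) → Bool → Bool
  | [], nxt => nxt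
  | (x, h) :: rest, nxt =>
    if PySem.Int.mod x 2 ≠ 0 then pvBwdSt rest (h || nxt)
    else pvBwdSt rest false

lemma pvFwd_length (B l : List Int) (prev : Bool) : (pvFwd B l prev).length = l.length := by
  induction l generalizing prev with
  | nil => rfl
  | cons x xs ih => rw [pvFwd]; split_ifs <;> simp [ih]

lemma pvFwd_append (B l1 l2 : List Int) (prev : Bool) :
    pvFwd B (l1 ++ l2) prev = pvFwd B l1 prev ++ pvFwd B l2 (pvFwdSt B l1 prev) := by
  induction l1 generalizing prev with
  | nil => rfl
  | cons x xs ih => simp only [List.cons_append, pvFwd, pvFwdSt]; split_ifs <;> simp [ih]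

lemma pvBwd_append (p1 p2 : List (Int × Bool)) (n : Bool) :
    pvBwd (p1 ++ p2) n = pvBwd p1 n ++ pvBwd p2 (pvBwdSt p1 n) := by
  induction p1 generalizing n with
  | nil => rfl
  | cons a rest ih => obtain ⟨x, h⟩ := a; simp only [List.cons_append, pvBwd, pvBwdSt]; split_ifs <;> simp [ih]

lemma pvBwdSt_append (p1 p2 : List (Int × Bool)) (n : Bool) :
    pvBwdSt (p1 ++ p2) n = pvBwdSt p2 (pvBwdSt p1 n) := by
  induction p1 generalizing n with
  | nil => rfl
  | cons a rest ih => obtain ⟨x, h⟩ := a; simp only [List.cons_append, pvBwdSt]; split_ifs <;> simp [ih]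

-- forward pass restarts after [] or an even head, whatever the carried flag
lemma pvFwd_reset (B rest : List Int) (s : Bool)
    (h : rest = [] ∨ ∃ y ys, rest = y :: ys ∧ pvOdd y = false) :
    pvFwd B rest s = pvFwd B rest false := by
  rcases h with rfl | ⟨y, ys, rfl, hy⟩
  · rfl
  · have hy' : ¬ PySem.Int.mod y 2 ≠ 0 := by simp [pvOdd] at hy; simp [hy]
    simp only [pvFwd]
    rw [if_neg hy', if_neg hy']

-- the keep flags of a maximal odd run: one pvBwd over the zipped reversed run
lemma pvRun (B : List Int) (r : List Int) (prev : Bool) (hr : r.all pvOdd = true) :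
    pvBwd (r.reverse.zip ((pvFwd B r prev).reverse)) false
      = List.replicate r.length (r.any (fun y => B.contains y) || prev)
    ∧ pvBwdSt (r.reverse.zip ((pvFwd B r prev).reverse)) false
      = ((r.any (fun y => B.contains y) || prev) && !r.isEmpty) := by
  induction r generalizing prev with
  | nil => simp [pvBwd, pvBwdSt]
  | cons x r' ih =>
    simp only [List.all_cons, Bool.and_eq_true] at hr
    obtain ⟨hx, hr'⟩ := hr
    have hx' : PySem.Int.mod x 2 ≠ 0 := (pvOdd_iff x).mp hx
    set p := (B.contains x || prev) with hp
    have hfwd : pvFwd B (x :: r') prev = p :: pvFwd B r' p := by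
      rw [pvFwd, if_pos hx']
    have hlen : r'.reverse.length = (pvFwd B r' p).reverse.length := by
      simp [pvFwd_length]
    have hzip : (x :: r').reverse.zip ((pvFwd B (x :: r') prev).reverse)
        = r'.reverse.zip ((pvFwd B r' p).reverse) ++ [(x, p)] := by
      rw [hfwd]
      simp only [List.reverse_cons]
      rw [List.zip_append hlen]
      rfl
    obtain ⟨ih1, ih2⟩ := ih p hr'
    have hK : (r'.any (fun y => B.contains y) || p)
        = ((x :: r').any (fun y => B.contains y) || prev) := by
      simp only [hp, List.any_cons]
      cases B.contains x <;> cases prev <;> cases r'.any (fun y => B.contains y) <;> simp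
    constructor
    · rw [hzip, pvBwd_append, ih1, ih2]
      have hsingle : ∀ s : Bool, pvBwd [(x, p)] s = [p || s] := by
        intro s; simp only [pvBwd]; rw [if_pos hx']
      rw [hsingle]
      cases hr'' : r'.isEmpty with
      | true =>
        have : r' = [] := List.isEmpty_iff.mp hr''
        subst this
        simp [hp, List.any_cons]
      | false =>
        have hpK : (p || (((r'.any fun y => B.contains y) || p) && !false))
            = ((r'.any fun y => B.contains y) || p) := by
          cases p <;> cases r'.any (fun y => B.contains y) <;> rfl
        rw [hpK, hK, List.length_cons, List.replicate_succ']
    · rw [hzip, pvBwdSt_append, ih2]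
      have : pvBwdSt [(x, p)] (((r'.any fun y => B.contains y) || p) && !r'.isEmpty)
          = (p || (((r'.any fun y => B.contains y) || p) && !r'.isEmpty)) := by
        simp only [pvBwdSt]; rw [if_pos hx']
      rw [this, ← hK]
      simp only [List.isEmpty_cons, Bool.not_false, Bool.and_true]
      cases hr'' : r'.isEmpty with
      | true =>
        have he : r' = [] := List.isEmpty_iff.mp hr''
        subst he
        simp
      | false =>
        cases p <;> cases r'.any (fun y => B.contains y) <;> rfl

lemma pvZipReplicateFilter (r : List Int) (c : Bool) :
    ((r.zip (List.replicate r.length c)).filter (fun p => p.2)).map (fun p => p.1)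
      = if c then r else [] := by
  induction r with
  | nil => simp
  | cons x xs ih =>
    simp only [List.length_cons, List.replicate_succ, List.zip_cons_cons, List.filter_cons]
    cases c <;> simp_all

lemma alt_nil (B : List Int) : method_with_std_alt [] B = [] := by
  simp [method_with_std_alt, pvFwd, pvBwd]

lemma alt_even_cons (B : List Int) (x : Int) (l : List Int) (hx : PySem.Int.mod x 2 = 0) :
    method_with_std_alt (x :: l) B = x :: method_with_std_alt l B := by
  have hx' : ¬ PySem.Int.mod x 2 ≠ 0 := fun h => h hx
  have hfwd : pvFwd B (x :: l) false = false :: pvFwd B l false := by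
    rw [pvFwd, if_neg hx']
  have hlen : l.reverse.length = (pvFwd B l false).reverse.length := by simp [pvFwd_length]
  have hzip : (x :: l).reverse.zip ((pvFwd B (x :: l) false).reverse)
      = l.reverse.zip ((pvFwd B l false).reverse) ++ [(x, false)] := by
    rw [hfwd]; simp only [List.reverse_cons]; rw [List.zip_append hlen]; rfl
  have hsingle : ∀ s : Bool, pvBwd [(x, false)] s = [true] := by
    intro s; simp only [pvBwd]; rw [if_neg hx']
  unfold method_with_std_alt
  simp only []
  rw [hzip, pvBwd_append, hsingle, List.reverse_append]
  simp

-- keep flags of a run ++ rest input split into run flags ++ rest flags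
lemma alt_decomp (B r rest : List Int) (hr : r.all pvOdd = true)
    (hrest : rest = [] ∨ ∃ y ys, rest = y :: ys ∧ pvOdd y = false) :
    method_with_std_alt (r ++ rest) B
      = (if r.any (fun y => B.contains y) then r else []) ++ method_with_std_alt rest B := by
  have hfwd : pvFwd B (r ++ rest) false = pvFwd B r false ++ pvFwd B rest false := by
    rw [pvFwd_append, pvFwd_reset B rest _ hrest]
  have hlenr : r.reverse.length = (pvFwd B r false).reverse.length := by simp [pvFwd_length]
  have hlenrest : rest.reverse.length = (pvFwd B rest false).reverse.length := by simp [pvFwd_length]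
  set prun := r.reverse.zip ((pvFwd B r false).reverse) with hprun
  set prest := rest.reverse.zip ((pvFwd B rest false).reverse) with hprest
  have hzip : (r ++ rest).reverse.zip ((pvFwd B (r ++ rest) false).reverse)
      = prest ++ prun := by
    rw [hfwd]; simp only [List.reverse_append]; rw [List.zip_append hlenrest]
  have hStrest : pvBwdSt prest false = false := by
    rcases hrest with h | ⟨y, ys, hy, hyodd⟩
    · subst h; rfl
    · have hy' : ¬ PySem.Int.mod y 2 ≠ 0 := by simp [pvOdd] at hyodd; simp [hyodd]
      subst hy
      have hfy : pvFwd B (y :: ys) false = false :: pvFwd B ys false := by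
        rw [pvFwd, if_neg hy']
      have hlys : ys.reverse.length = (pvFwd B ys false).reverse.length := by simp [pvFwd_length]
      have : prest = ys.reverse.zip ((pvFwd B ys false).reverse) ++ [(y, false)] := by
        rw [hprest, hfy]; simp only [List.reverse_cons]; rw [List.zip_append hlys]; rfl
      rw [this, pvBwdSt_append]
      simp only [pvBwdSt]; rw [if_neg hy']
  obtain ⟨hrun, -⟩ := pvRun B r false hr
  set K := r.any (fun y => B.contains y) with hK
  have hbwd : pvBwd (prest ++ prun) false
      = pvBwd prest false ++ List.replicate r.length K := by
    rw [pvBwd_append, hStrest, hrun]; simp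
  have hkeep : (pvBwd (prest ++ prun) false).reverse
      = List.replicate r.length K ++ (pvBwd prest false).reverse := by
    rw [hbwd, List.reverse_append, List.reverse_replicate]
  have hlenkeep : r.length = (List.replicate r.length K).length := by simp
  unfold method_with_std_alt
  simp only [hzip, hkeep]
  rw [List.zip_append hlenkeep, List.filter_append, List.map_append, pvZipReplicateFilter]

-- dropWhile produces [] or a head violating the predicate
lemma pvDropWhile_head (p : Int → Bool) (l : List Int) :
    l.dropWhile p = [] ∨ ∃ y ys, l.dropWhile p = y :: ys ∧ p y = false := by
  induction l with
  | nil => exact Or.inl rfl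
  | cons x xs ih =>
    by_cases h : p x
    · simpa [List.dropWhile_cons, h] using ih
    · exact Or.inr ⟨x, xs, by simp [h], by simp [h]⟩

lemma alt_odd_cons (B : List Int) (x : Int) (l : List Int) (_hx : PySem.Int.mod x 2 ≠ 0) :
    method_with_std_alt (x :: l) B
      = (if ((x :: l).takeWhile pvOdd).any (fun y => B.contains y)
          then (x :: l).takeWhile pvOdd else [])
        ++ method_with_std_alt ((x :: l).dropWhile pvOdd) B := by
  have h1 : (x :: l).takeWhile pvOdd ++ (x :: l).dropWhile pvOdd = x :: l :=
    List.takeWhile_append_dropWhile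
  have h2 : ((x :: l).takeWhile pvOdd).all pvOdd = true := by
    rw [List.all_eq_true]
    intro a ha
    exact List.mem_takeWhile_imp ha
  have h3 := pvDropWhile_head pvOdd (x :: l)
  calc method_with_std_alt (x :: l) B
      = method_with_std_alt ((x :: l).takeWhile pvOdd ++ (x :: l).dropWhile pvOdd) B := by rw [h1]
    _ = _ := alt_decomp B _ _ h2 h3

lemma pvTake_len_takeWhile (p : Int → Bool) (l : List Int) :
    l.take (l.takeWhile p).length = l.takeWhile p := by
  induction l with
  | nil => simp
  | cons x xs ih => by_cases h : p x <;> simp [h, ih]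

lemma pvDropWhile_eq_drop (p : Int → Bool) (l : List Int) :
    l.dropWhile p = l.drop (l.takeWhile p).length := by
  induction l with
  | nil => simp
  | cons x xs ih => by_cases h : p x <;> simp [h, ih]

lemma pvInnerWhile_eq (A : List Int) (fuel i : Nat) (hf : A.length - i ≤ fuel) :
    pvInnerWhile A fuel i = i + ((A.drop i).takeWhile pvOdd).length := by
  induction fuel generalizing i with
  | zero =>
    rw [pvInnerWhile]
    simp [List.drop_eq_nil_of_le (by omega : A.length ≤ i)]
  | succ n ih =>
    rw [pvInnerWhile]
    by_cases h : i < A.length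
    · rw [dif_pos h, List.drop_eq_getElem_cons h]
      by_cases ho : PySem.Int.mod A[i] 2 ≠ 0
      · rw [if_pos ho, ih (i + 1) (by omega)]
        rw [List.takeWhile_cons, if_pos ((pvOdd_iff _).mpr ho)]
        simp; omega
      · rw [if_neg ho, List.takeWhile_cons]
        have : pvOdd A[i] = false := by
          simp only [Bool.eq_false_iff, Ne, pvOdd_iff]; tauto
        simp [this]
    · rw [dif_neg h]
      simp [List.drop_eq_nil_of_le (by omega : A.length ≤ i)]

lemma pvALoop_eq (A B : List Int) (fuel i : Nat) (res : List Int) (hf : A.length - i ≤ fuel) :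
    pvALoop A B fuel i res = res ++ method_with_std_alt (A.drop i) B := by
  induction fuel generalizing i res with
  | zero =>
    rw [pvALoop]
    simp [List.drop_eq_nil_of_le (by omega : A.length ≤ i), alt_nil]
  | succ n ih =>
    rw [pvALoop]
    by_cases h : i < A.length
    · rw [dif_pos h]
      by_cases he : PySem.Int.mod A[i] 2 = 0
      · rw [if_pos he, ih (i + 1) _ (by omega)]
        rw [List.drop_eq_getElem_cons h, alt_even_cons B _ _ he]
        simp
      · rw [if_neg he]
        have hcons : A.drop i = A[i] :: A.drop (i + 1) := List.drop_eq_getElem_cons h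
        have hodd : pvOdd A[i] = true := (pvOdd_iff _).mpr he
        have hj : pvInnerWhile A (A.length - i) i = i + ((A.drop i).takeWhile pvOdd).length :=
          pvInnerWhile_eq A (A.length - i) i le_rfl
        have hpos : 1 ≤ ((A.drop i).takeWhile pvOdd).length := by
          rw [hcons, List.takeWhile_cons, if_pos hodd]; simp
        have hlen : ((A.drop i).takeWhile pvOdd).length ≤ A.length - i := by
          have h1 : ((A.drop i).takeWhile pvOdd).length ≤ (A.drop i).length :=
            (List.takeWhile_prefix _).length_le
          simp at h1; omega
        have hpart : PySem.List.slice A (some (i : Int)) (some (pvInnerWhile A (A.length - i) i : Int))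
            = (A.drop i).takeWhile pvOdd := by
          rw [hj]
          push_cast
          rw [PySem.List.slice_natCast_add]
          exact pvTake_len_takeWhile pvOdd (A.drop i)
        have hdropj : A.drop (pvInnerWhile A (A.length - i) i) = (A.drop i).dropWhile pvOdd := by
          rw [hj, pvDropWhile_eq_drop, ← List.drop_drop]
        rw [ih (pvInnerWhile A (A.length - i) i) _ (by omega), hpart, hdropj]
        rw [hcons, alt_odd_cons B _ _ he, ← hcons]
        split <;> simp
    · rw [dif_neg h]
      simp [List.drop_eq_nil_of_le (by omega : A.length ≤ i), alt_nil]

-- ===== VERDICT (by name: the statement is the Claim_ definition above) =====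
theorem method_with_std_spec : Claim_equal_method_with_std := by
  intro A B _
  show method_with_std A B = method_with_std_alt A B
  rw [method_with_std, pvALoop_eq A B A.length 0 [] (by omega)]
  simp
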